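-- pv_equiv track=rewrite | github.com/karockai/Yongorithm | 테스트/3.py | solution
-- ===== SOURCE A (Python) =====
-- def solution(day, k):
--     answer = []
--     months = [31, 28, 31, 30, 31, 30, 31, 31, 30, 31, 30, 31]
--
--     day += (k - 1)
--
--     for month in months:
--         curDay = day % 7
--
--         answer.append(1) if (curDay == 5 or curDay == 6) else answer.append(0)
--
--         day += month
--
--     return answer
-- ===== SOURCE B (Python) =====
-- # The whole output depends only on (day + k - 1) mod 7: the answer is looked up
-- # in a precomputed table of the 7 possible rows (row r = weekend flags for a year
-- # whose Jan 1 has weekday residue r, derived once from the month lengths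
-- # [31,28,31,30,31,30,31,31,30,31,30,31]).
-- _TABLE = [
--     [0, 0, 0, 1, 0, 0, 1, 0, 1, 0, 0, 1],
--     [0, 0, 0, 0, 0, 1, 0, 0, 1, 0, 0, 1],
--     [0, 1, 1, 0, 0, 1, 0, 0, 0, 0, 1, 0],
--     [0, 1, 1, 0, 0, 0, 0, 1, 0, 0, 1, 0],
--     [0, 0, 0, 0, 1, 0, 0, 1, 0, 0, 0, 0],
--     [1, 0, 0, 0, 1, 0, 0, 0, 0, 1, 0, 0],
--     [1, 0, 0, 1, 0, 0, 1, 0, 0, 1, 0, 0],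
-- ]
--
-- def solution(day, k):
--     return _TABLE[(day + k - 1) % 7]
-- ===== Notes on version B (the rewrite author's own statement) =====
-- stated objective: alternative
-- what changed: B performs no per-month loop at all: it observes the result depends only on (day+k-1) mod 7 and returns the matching row of a precomputed 7-row lookup table, instead of A's loop threading a running day total through the 12 months.
import Mathlib
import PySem

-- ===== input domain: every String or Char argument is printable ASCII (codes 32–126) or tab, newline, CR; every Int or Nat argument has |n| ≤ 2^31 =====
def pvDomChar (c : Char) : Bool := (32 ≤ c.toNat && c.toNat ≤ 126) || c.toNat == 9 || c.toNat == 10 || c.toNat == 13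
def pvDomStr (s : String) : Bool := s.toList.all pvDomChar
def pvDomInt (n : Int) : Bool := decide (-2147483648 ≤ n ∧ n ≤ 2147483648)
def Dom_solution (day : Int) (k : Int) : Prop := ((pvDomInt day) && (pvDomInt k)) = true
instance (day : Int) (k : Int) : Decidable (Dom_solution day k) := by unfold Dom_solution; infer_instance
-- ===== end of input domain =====

-- B replaces A's 12-iteration loop with a precomputed 7-row lookup table indexed by (day+k-1) mod 7 (alternative algorithm; no loop at runtime).

-- ===== PORT A =====
def solution (day : Int) (k : Int) : List Int :=
  let months : List Int := [31, 28, 31, 30, 31, 30, 31, 31, 30, 31, 30, 31]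
  let day := day + (k - 1)
  (months.foldl (fun (st : List Int × Int) month =>
      let curDay := PySem.Int.mod st.2 7
      (st.1 ++ [if curDay = 5 ∨ curDay = 6 then (1 : Int) else 0], st.2 + month))
    ([], day)).1

-- ===== PORT B =====
def pvTable : List (List Int) :=
  [[0, 0, 0, 1, 0, 0, 1, 0, 1, 0, 0, 1],
   [0, 0, 0, 0, 0, 1, 0, 0, 1, 0, 0, 1],
   [0, 1, 1, 0, 0, 1, 0, 0, 0, 0, 1, 0],
   [0, 1, 1, 0, 0, 0, 0, 1, 0, 0, 1, 0],
   [0, 0, 0, 0, 1, 0, 0, 1, 0, 0, 0, 0],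
   [1, 0, 0, 0, 1, 0, 0, 0, 0, 1, 0, 0],
   [1, 0, 0, 1, 0, 0, 1, 0, 0, 1, 0, 0]]

def solution_alt (day : Int) (k : Int) : List Int :=
  -- _TABLE[(day + k - 1) % 7]; the index is always in 0..6, so the total pyGetD is exact
  PySem.List.pyGetD pvTable (PySem.Int.mod (day + k - 1) 7) []

-- ===== PRECONDITION & SPEC =====
def Spec_solution (day : Int) (k : Int) (out : List Int) : Prop := out = solution_alt day k
instance (day : Int) (k : Int) (out : List Int) : Decidable (Spec_solution day k out) := by unfold Spec_solution; infer_instance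

-- ===== CLAIM (what is proved, stated in full; the proofs are below) =====
def Claim_equal_solution : Prop := ∀ (day : Int) (k : Int), Dom_solution day k → Spec_solution day k (solution day k)

-- ===== LEMMAS AND PROOFS =====

theorem mod7_shift (q x : Int) : PySem.Int.mod (7 * q + x) 7 = PySem.Int.mod x 7 := by
  rw [PySem.Int.mod_eq_emod_of_pos (by norm_num), PySem.Int.mod_eq_emod_of_pos (by norm_num)]
  omega

-- ===== VERDICT (by name: the statement is the Claim_ definition above) =====
theorem solution_spec : Claim_equal_solution := by
  intro day k _
  show solution day k = solution_alt day k
  set r := PySem.Int.mod (day + (k - 1)) 7 with hr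
  have hrb : 0 ≤ r ∧ r < 7 :=
    ⟨PySem.Int.mod_nonneg _ (by norm_num), PySem.Int.mod_lt _ (by norm_num)⟩
  have hfm := PySem.Int.floordiv_mul_add_mod (day + (k - 1)) 7
  set q := PySem.Int.floordiv (day + (k - 1)) 7 with hqdef
  have hq : day + (k - 1) = 7 * q + r := by rw [hr]; omega
  have hq2 : day + k - 1 = 7 * q + r := by omega
  obtain ⟨h0, h1⟩ := hrb
  simp only [solution, solution_alt, List.foldl, List.nil_append, List.cons_append]
  rw [hq, hq2]
  simp only [add_assoc, mod7_shift]
  interval_cases r <;> decide
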